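-- pv_equiv track=rewrite | github.com/Luca97Cuomo/sna-project | exercise-3/src/dataset/generate.py | generate_labels_using_only_available_features
-- ===== SOURCE A (Python) =====
-- import typing
--
-- def feature_sum_to_score(feature_sum, num_available_features=3):
--     if num_available_features == 3:
--         first_endpoint = 1
--         second_endpoint = 6
--         third_endpoint = 12
--         fourth_endpoint = 18
--     elif num_available_features == 2:
--         first_endpoint = 1
--         second_endpoint = 4
--         third_endpoint = 8
--         fourth_endpoint = 12
--     elif num_available_features == 1:
--         first_endpoint = 1
--         second_endpoint = 2
--         third_endpoint = 4
--         fourth_endpoint = 6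
--     else:
--         raise ValueError('num_available_features must be in [1, 2, 3]')
--
--     if first_endpoint <= feature_sum <= second_endpoint:
--         return 1
--     elif second_endpoint < feature_sum <= third_endpoint:
--         return 2
--     elif third_endpoint < feature_sum <= fourth_endpoint:
--         return 3
--     else:
--         raise ValueError(f'feature sum must be in [{first_endpoint}, {fourth_endpoint}]')
--
-- def generate_labels_using_only_available_features(samples: typing.Iterable[typing.List]) -> typing.List[int]:
--     labels = []
--
--     for sample in samples:
--         score = 0
--         available_features = 3
--         for feature in sample:
--             if feature is None:
--                 available_features -= 1
--                 continue
--             score += feature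
--
--         score = feature_sum_to_score(score, num_available_features=available_features)
--         labels.append(score)
--
--     return labels
-- ===== SOURCE B (Python) =====
-- import typing
--
-- def _sample_score(sample):
--     values = [f for f in sample if f is not None]
--     num_available = 3 - (len(sample) - len(values))
--     if not 1 <= num_available <= 3:
--         raise ValueError('num_available_features must be in [1, 2, 3]')
--     step = 2 * num_available
--     feature_sum = sum(values)
--     if not 1 <= feature_sum <= 3 * step:
--         raise ValueError(f'feature sum must be in [1, {3 * step}]')
--     return (feature_sum + step - 1) // step  # ceil(feature_sum / step) in {1, 2, 3}
--
-- def generate_labels_using_only_available_features(samples: typing.Iterable[typing.List]) -> typing.List[int]: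
--     return [_sample_score(sample) for sample in samples]
-- ===== Notes on version B (the rewrite author's own statement) =====
-- stated objective: simpler
-- what changed: The per-sample score is computed by a closed-form ceiling division (feature_sum + 2n - 1) // (2n) after two range checks, instead of selecting four endpoint constants and walking a three-branch threshold cascade; the result list is built by a comprehension over a per-sample helper instead of an accumulator loop.
import Mathlib
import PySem

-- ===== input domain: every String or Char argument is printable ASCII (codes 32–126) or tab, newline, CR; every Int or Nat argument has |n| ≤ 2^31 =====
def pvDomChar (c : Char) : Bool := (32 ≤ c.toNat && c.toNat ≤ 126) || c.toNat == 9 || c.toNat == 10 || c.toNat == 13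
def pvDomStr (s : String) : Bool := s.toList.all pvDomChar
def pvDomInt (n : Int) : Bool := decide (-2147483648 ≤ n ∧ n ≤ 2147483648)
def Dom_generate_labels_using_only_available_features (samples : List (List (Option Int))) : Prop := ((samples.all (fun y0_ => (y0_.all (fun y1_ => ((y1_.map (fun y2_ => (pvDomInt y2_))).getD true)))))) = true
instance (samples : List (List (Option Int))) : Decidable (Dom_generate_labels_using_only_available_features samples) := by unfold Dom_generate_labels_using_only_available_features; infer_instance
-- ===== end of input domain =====

-- B replaces A's four-endpoint three-branch cascade by a closed-form ceiling division
-- (feature_sum + 2n - 1) // (2n) with two range checks, and builds the result list by a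
-- per-sample helper instead of an accumulator loop (objective: simpler).

-- ===== PORT A =====
-- Python raises ValueError inside feature_sum_to_score; the port returns none exactly there.
def pvClassify (feature_sum e1 e2 e3 e4 : Int) : Option Int :=
  if e1 ≤ feature_sum ∧ feature_sum ≤ e2 then some 1
  else if e2 < feature_sum ∧ feature_sum ≤ e3 then some 2
  else if e3 < feature_sum ∧ feature_sum ≤ e4 then some 3
  else none

def feature_sum_to_score (feature_sum : Int) (num_available_features : Int) : Option Int :=
  if num_available_features = 3 then pvClassify feature_sum 1 6 12 18
  else if num_available_features = 2 then pvClassify feature_sum 1 4 8 12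
  else if num_available_features = 1 then pvClassify feature_sum 1 2 4 6
  else none

-- the inner 'for feature in sample' loop: state (score, available_features)
def pvSampleState (sample : List (Option Int)) : Int × Int :=
  sample.foldl (fun p f => match f with
    | none => (p.1, p.2 - 1)
    | some v => (p.1 + v, p.2)) (0, 3)

-- the outer 'for sample in samples' loop with the labels accumulator
def pvLoopA : List (List (Option Int)) → List Int → Option (List Int)
  | [], labels => some labels
  | sample :: rest, labels =>
      let st := pvSampleState sample
      match feature_sum_to_score st.1 st.2 with
      | none => none
      | some score => pvLoopA rest (labels ++ [score])

def generate_labels_using_only_available_features (samples : List (List (Option Int))) : List Int :=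
  (pvLoopA samples []).getD []

-- ===== PORT B =====
def pvSampleScore? (sample : List (Option Int)) : Option Int :=
  let values := sample.filterMap id
  let num_available : Int := 3 - ((sample.length : Int) - (values.length : Int))
  if 1 ≤ num_available ∧ num_available ≤ 3 then
    let step := 2 * num_available
    let feature_sum := values.sum
    if 1 ≤ feature_sum ∧ feature_sum ≤ 3 * step then
      some (PySem.Int.floordiv (feature_sum + step - 1) step)
    else none
  else none

-- the list comprehension over _sample_score (cons-building; none propagates a ValueError)
def pvListB : List (List (Option Int)) → Option (List Int)
  | [] => some []
  | sample :: rest =>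
      match pvSampleScore? sample, pvListB rest with
      | some v, some l => some (v :: l)
      | _, _ => none

def generate_labels_using_only_available_features_alt (samples : List (List (Option Int))) : List Int :=
  (pvListB samples).getD []

-- ===== PRECONDITION & SPEC =====
-- Pre_ excludes exactly the inputs on which Python A raises ValueError: a sample with three or
-- more None features, or a sample whose non-None feature sum lies outside [1, 6*(3 - #None)].
def Pre_generate_labels_using_only_available_features (samples : List (List (Option Int))) : Prop :=
  ∀ sample ∈ samples,
    (sample.countP (· = none) : Int) ≤ 2 ∧
    1 ≤ (sample.filterMap id).sum ∧
    (sample.filterMap id).sum ≤ 6 * (3 - (sample.countP (· = none) : Int))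
instance (samples : List (List (Option Int))) : Decidable (Pre_generate_labels_using_only_available_features samples) := by unfold Pre_generate_labels_using_only_available_features; infer_instance

def pvWitness_generate_labels_using_only_available_features : List (List (Option Int)) :=
  [[some 1, some 2, some 3], [none, some 5], [some 5, none, none]]

def Spec_generate_labels_using_only_available_features (samples : List (List (Option Int))) (out : List Int) : Prop := out = generate_labels_using_only_available_features_alt samples
instance (samples : List (List (Option Int))) (out : List Int) : Decidable (Spec_generate_labels_using_only_available_features samples out) := by unfold Spec_generate_labels_using_only_available_features; infer_instance

-- ===== CLAIM (what is proved, stated in full; the proofs are below) =====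
def Claim_equal_generate_labels_using_only_available_features : Prop := ∀ (samples : List (List (Option Int))), Dom_generate_labels_using_only_available_features samples → Pre_generate_labels_using_only_available_features samples → Spec_generate_labels_using_only_available_features samples (generate_labels_using_only_available_features samples)

-- ===== LEMMAS AND PROOFS =====

lemma pv_len_aux (sample : List (Option Int)) :
    (sample.filterMap id).length + sample.countP (· = none) = sample.length := by
  induction sample with
  | nil => simp
  | cons x xs ih => cases x <;> simp_all <;> omega

-- A's inner loop computes (sum of non-None features, 3 - number of Nones)
lemma pvSampleState_eq (sample : List (Option Int)) :
    pvSampleState sample = ((sample.filterMap id).sum, 3 - (sample.countP (· = none) : Int)) := by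
  unfold pvSampleState
  suffices h : ∀ (a b : Int), sample.foldl (fun p f => match f with
      | none => (p.1, p.2 - 1)
      | some v => (p.1 + v, p.2)) (a, b)
      = (a + (sample.filterMap id).sum, b - (sample.countP (· = none) : Int)) by
    simpa using h 0 3
  induction sample with
  | nil => intro a b; simp
  | cons x xs ih =>
    intro a b
    cases x with
    | none => simp [ih]; ring
    | some v => simp [ih]; ring

-- A's cascade equals B's ceiling division, for any admissible n and in-range sum
lemma score_arith (s n : Int) (hn1 : 1 ≤ n) (hn3 : n ≤ 3) (h1 : 1 ≤ s) (h2 : s ≤ 6 * n) :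
    feature_sum_to_score s n = some (PySem.Int.floordiv (s + 2 * n - 1) (2 * n)) := by
  interval_cases n <;>
    rw [PySem.Int.floordiv_eq_ediv_of_pos (by norm_num)] <;>
    unfold feature_sum_to_score pvClassify <;>
    norm_num <;> split_ifs <;> simp_all <;> omega

-- per-sample: A's score (cascade) equals B's score (ceiling division) as Options, when Pre_ holds
lemma score_eq (sample : List (Option Int))
    (hk : (sample.countP (· = none) : Int) ≤ 2)
    (h1 : 1 ≤ (sample.filterMap id).sum)
    (h2 : (sample.filterMap id).sum ≤ 6 * (3 - (sample.countP (· = none) : Int))) :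
    feature_sum_to_score (pvSampleState sample).1 (pvSampleState sample).2
      = pvSampleScore? sample := by
  rw [pvSampleState_eq]
  have hlen := pv_len_aux sample
  have hk0 : (0 : Int) ≤ (sample.countP (· = none) : Int) := by positivity
  have hna : (3 : Int) - ((sample.length : Int) - ((sample.filterMap id).length : Int))
      = 3 - (sample.countP (· = none) : Int) := by omega
  simp only [pvSampleScore?, hna]
  rw [if_pos (show (1:Int) ≤ 3 - (sample.countP (· = none) : Int) ∧
        (3:Int) - (sample.countP (· = none) : Int) ≤ 3 by constructor <;> omega),
      if_pos (show (1:Int) ≤ (sample.filterMap id).sum ∧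
        (sample.filterMap id).sum ≤ 3 * (2 * (3 - (sample.countP (· = none) : Int)))
        by constructor <;> omega)]
  exact score_arith _ _ (by omega) (by omega) h1 (by omega)

-- the two outer loops agree, with an arbitrary accumulator on A's side
lemma loop_eq (samples : List (List (Option Int)))
    (hpre : Pre_generate_labels_using_only_available_features samples) :
    ∀ labels, pvLoopA samples labels = (pvListB samples).map (labels ++ ·) := by
  induction samples with
  | nil => intro labels; simp [pvLoopA, pvListB]
  | cons sample rest ih =>
    intro labels
    have hp := hpre sample (List.mem_cons_self ..)
    have hrest : Pre_generate_labels_using_only_available_features rest :=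
      fun s hs => hpre s (List.mem_cons_of_mem _ hs)
    rw [pvLoopA, pvListB, ← score_eq sample hp.1 hp.2.1 hp.2.2]
    cases h : feature_sum_to_score (pvSampleState sample).1 (pvSampleState sample).2 with
    | none => simp
    | some v =>
      simp only [ih hrest]
      cases pvListB rest <;> simp

-- ===== VERDICT (by name: the statement is the Claim_ definition above) =====
theorem generate_labels_using_only_available_features_spec : Claim_equal_generate_labels_using_only_available_features := by
  intro samples _ hpre
  unfold Spec_generate_labels_using_only_available_features
  unfold generate_labels_using_only_available_features generate_labels_using_only_available_features_alt
  rw [loop_eq samples hpre []]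
  cases pvListB samples <;> simp
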